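-- pv_equiv track=rewrite | github.com/timrprobocom/advent-of-code | 2024/day07.py | part1
-- ===== SOURCE A (Python) =====
-- def part1(data):
--     sumx = 0
--     for row in data:
--         k = row[0]
--         maybe = [row[1]]
--         for v1 in row[2:]:
--             maybe = [ s
--                 for m in maybe
--                 for s in (m+v1, m*v1)
--                 if s <= k
--             ]
--         if k in maybe:
--             sumx += k
--     return sumx
-- ===== SOURCE B (Python) =====
-- def part1(data):
--     def reach(k, m, rest):
--         if not rest:
--             return m == k
--         v = rest[0]
--         a = m + v
--         b = m * v
--         tail = rest[1:]
--         return (a <= k and reach(k, a, tail)) or (b <= k and reach(k, b, tail))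
--
--     return sum(row[0] for row in data if reach(row[0], row[1], row[2:]))
-- ===== Notes on version B (the rewrite author's own statement) =====
-- stated objective: alternative
-- what changed: Replaces A's breadth-first growth of a filtered candidate list per operator with a short-circuiting depth-first recursion that checks reachability of the target directly, materialising no intermediate lists.
-- outside the precondition, e.g. on part1([[5]]): A raises IndexError, B raises IndexError
import Mathlib
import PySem

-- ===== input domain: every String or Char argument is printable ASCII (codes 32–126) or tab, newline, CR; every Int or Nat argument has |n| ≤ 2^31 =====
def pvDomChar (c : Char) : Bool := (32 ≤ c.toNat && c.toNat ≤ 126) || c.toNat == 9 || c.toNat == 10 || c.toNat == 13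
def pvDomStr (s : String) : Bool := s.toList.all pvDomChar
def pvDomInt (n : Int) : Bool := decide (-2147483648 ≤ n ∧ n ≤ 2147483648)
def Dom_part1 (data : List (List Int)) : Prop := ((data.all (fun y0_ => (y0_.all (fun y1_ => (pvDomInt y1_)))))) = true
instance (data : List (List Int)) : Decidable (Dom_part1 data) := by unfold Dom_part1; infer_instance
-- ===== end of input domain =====

-- B replaces A's per-operator breadth-first list growth with a short-circuiting
-- depth-first recursion checking the target directly (objective: alternative).

-- ===== PORT A =====
def part1Step (k v1 : Int) (maybe : List Int) : List Int :=
  maybe.flatMap (fun m => ([m + v1, m * v1]).filter (fun s => decide (s ≤ k)))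

def part1 (data : List (List Int)) : Int :=
  data.foldl (fun sumx row =>
    let k := PySem.List.pyGetD row 0 0
    let maybe0 : List Int := [PySem.List.pyGetD row 1 0]
    let maybe := (PySem.List.slice row (some 2) none).foldl
      (fun mb v1 => part1Step k v1 mb) maybe0
    if maybe.contains k then sumx + k else sumx) 0

-- ===== PORT B =====
def reachB (k m : Int) : List Int → Bool
  | [] => m == k
  | v :: rest =>
      let a := m + v
      let b := m * v
      (decide (a ≤ k) && reachB k a rest) || (decide (b ≤ k) && reachB k b rest)

def part1_alt (data : List (List Int)) : Int :=
  ((data.filter (fun row =>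
      reachB (PySem.List.pyGetD row 0 0) (PySem.List.pyGetD row 1 0)
        (PySem.List.slice row (some 2) none))).map
    (fun row => PySem.List.pyGetD row 0 0)).sum

-- ===== PRECONDITION & SPEC =====
-- Pre_ excludes exactly the rows on which Python A raises IndexError (row[0]/row[1]
-- on a row of length < 2); B raises there as well.
def Pre_part1 (data : List (List Int)) : Prop := ∀ row ∈ data, 2 ≤ row.length
instance (data : List (List Int)) : Decidable (Pre_part1 data) := by unfold Pre_part1; infer_instance
def pvWitness_part1 : List (List Int) := [[3, 1, 2], [5, 2, 2]]

def Spec_part1 (data : List (List Int)) (out : Int) : Prop := out = part1_alt data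
instance (data : List (List Int)) (out : Int) : Decidable (Spec_part1 data out) := by unfold Spec_part1; infer_instance

-- ===== CLAIM (what is proved, stated in full; the proofs are below) =====
def Claim_equal_part1 : Prop := ∀ (data : List (List Int)), Dom_part1 data → Pre_part1 data → Spec_part1 data (part1 data)

-- ===== LEMMAS AND PROOFS =====

-- The level-by-level filtered list of A contains k iff some current candidate can
-- reach k by B's depth-first recursion.
theorem fold_contains_eq_any (k : Int) (vs : List Int) :
    ∀ (maybe : List Int),
      (vs.foldl (fun mb v1 => part1Step k v1 mb) maybe).contains k
        = maybe.any (fun m => reachB k m vs) := by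
  induction vs with
  | nil =>
      intro maybe
      simp only [List.foldl_nil, reachB]
      rw [Bool.eq_iff_iff]
      simp only [List.contains_iff_mem, List.any_eq_true, beq_iff_eq]
      exact ⟨fun h => ⟨k, h, rfl⟩, fun ⟨m, hm, e⟩ => e ▸ hm⟩
  | cons v vs ih =>
      intro maybe
      rw [List.foldl_cons, ih]
      simp [part1Step, List.any_filter, reachB, Bool.and_comm]

theorem foldl_row_sum (data : List (List Int)) :
    ∀ (s : Int),
      data.foldl (fun sumx row =>
        let k := PySem.List.pyGetD row 0 0
        let maybe0 : List Int := [PySem.List.pyGetD row 1 0]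
        let maybe := (PySem.List.slice row (some 2) none).foldl
          (fun mb v1 => part1Step k v1 mb) maybe0
        if maybe.contains k then sumx + k else sumx) s
      = s + ((data.filter (fun row =>
          reachB (PySem.List.pyGetD row 0 0) (PySem.List.pyGetD row 1 0)
            (PySem.List.slice row (some 2) none))).map
          (fun row => PySem.List.pyGetD row 0 0)).sum := by
  induction data with
  | nil => intro s; simp
  | cons row rows ih =>
      intro s
      rw [List.foldl_cons, ih]
      simp only [fold_contains_eq_any, List.any_cons, List.any_nil, Bool.or_false, List.filter_cons]
      by_cases hc : reachB (PySem.List.pyGetD row 0 0) (PySem.List.pyGetD row 1 0)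
          (PySem.List.slice row (some 2) none) = true
      · simp [hc]; ring
      · simp [hc]

-- ===== VERDICT (by name: the statement is the Claim_ definition above) =====
theorem part1_spec : Claim_equal_part1 := by
  intro data _hdom _hpre
  unfold Spec_part1 part1 part1_alt
  rw [foldl_row_sum data 0]
  simp
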